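-- pv_equiv track=rewrite | github.com/Wang-Yann/LeetCodeMe | python/_1001_1500/1434_number-of-ways-to-wear-different-hats-to-each-other.py | numberWays
-- ===== SOURCE A (Python) =====
-- import functools
-- from typing import List
--
-- def numberWays(hats: List[List[int]]) -> int:
--     # 总人数
--     MOD = 10 ** 9 + 7
--     N = len(hats)
--
--     @functools.lru_cache(None)
--     def dp(cur, pos):
--         # cur 代表当前轮到第cur顶帽子可供选择
--         # pos 代表当前戴帽的人有哪些，为二进制压缩状态形式
--         # 首先，如果当前所有人都带上了帽，则返回1
--         if pos == (1 << N) - 1: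
--             return 1
--         # 若不满足所有人都戴上了帽，且当前也没有帽子了，则返回0
--         if cur > 40:
--             return 0
--         # 首先考虑不戴该顶帽子，直接考虑后一顶，则其值应为dp(cur+1, pos)
--         res = dp(cur + 1, pos)
--         # 考虑有人佩戴该顶帽子
--         for i in range(N):
--             # 找到喜欢该帽子的人，且这个人并没有戴其他帽子（即二进制pos中该位置为0）
--             if cur in hats[i] and not pos & (1 << i):
--                 # 给这个人戴上帽子（该位置置1），并依序进行下去
--                 res += dp(cur + 1, pos + (1 << i))
--         return res % MOD
--
--     return dp(0, 0)
-- ===== SOURCE B (Python) =====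
-- def numberWays(hats):
--     MOD = 10 ** 9 + 7
--     N = len(hats)
--     full = (1 << N) - 1
--     # inverted index: pm[h] = bitmask of the people who like hat h
--     pm = [0] * 41
--     for i in range(N):
--         for h in hats[i]:
--             if 0 <= h <= 40:
--                 pm[h] |= 1 << i
--     # forward DP over hats: dist maps reachable people-mask -> ways (mod MOD)
--     dist = {0: 1}
--     for cur in range(41):
--         avail = pm[cur]
--         new = {}
--         for m, v in dist.items():
--             new[m] = (new.get(m, 0) + v) % MOD
--             for i in range(N):
--                 if avail >> i & 1 and not m >> i & 1:
--                     new[m + (1 << i)] = (new.get(m + (1 << i), 0) + v) % MOD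
--         dist = new
--     return dist.get(full, 0)
-- ===== Notes on version B (the rewrite author's own statement) =====
-- stated objective: alternative
-- what changed: Replaces A's memoized top-down recursion (which rescans every person's preference list per state via 'cur in hats[i]') by an iterative forward DP that pushes a dict of reachable people-masks hat by hat, using a precomputed hat->people bitmask inverted index so the inner test is a single bit check.
import Mathlib
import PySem

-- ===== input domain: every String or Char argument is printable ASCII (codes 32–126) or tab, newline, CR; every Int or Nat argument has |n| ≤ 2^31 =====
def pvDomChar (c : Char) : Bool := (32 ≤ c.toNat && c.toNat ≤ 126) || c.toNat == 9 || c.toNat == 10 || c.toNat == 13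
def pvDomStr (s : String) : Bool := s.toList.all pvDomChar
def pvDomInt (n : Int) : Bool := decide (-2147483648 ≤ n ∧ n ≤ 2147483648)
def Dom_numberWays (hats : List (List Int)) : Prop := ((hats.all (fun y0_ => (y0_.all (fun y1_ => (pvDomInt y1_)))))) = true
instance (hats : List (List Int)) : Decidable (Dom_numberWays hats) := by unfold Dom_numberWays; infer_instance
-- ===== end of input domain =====

-- B replaces A's memoized top-down recursion (membership scan `cur in hats[i]` per state) by an
-- iterative forward DP pushing a dict of reachable people-masks through the hats, driven by a
-- precomputed hat -> people-bitmask inverted index.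

-- ===== PORT A =====
-- dp(cur, pos) of A; recursion on cur bounded by 41 (the `cur > 40` base case).
def dpA (hats : List (List Int)) (N : Nat) (cur : Nat) (pos : Nat) : Int :=
  if pos = 2 ^ N - 1 then 1
  else if 40 < cur then 0
  else
    PySem.Int.mod
      ((List.range N).foldl
        (fun res i =>
          if (cur : Int) ∈ hats.getD i [] ∧ pos &&& (1 <<< i) = 0 then
            res + dpA hats N (cur + 1) (pos + (1 <<< i))
          else res)
        (dpA hats N (cur + 1) pos))
      (10 ^ 9 + 7)
termination_by 41 - cur
decreasing_by all_goals omega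

def numberWays (hats : List (List Int)) : Int := dpA hats hats.length 0 0

-- ===== PORT B =====
-- inner loop of the inverted-index build: person i's preference list
def bInner (hats : List (List Int)) (i : Nat) (pm : List Nat) : List Nat :=
  (hats.getD i []).foldl
    (fun (pm : List Nat) (h : Int) =>
      if 0 ≤ h ∧ h ≤ 40 then pm.modify h.toNat (fun x => x ||| (1 <<< i)) else pm)
    pm

-- pm: for each hat 0..40 the bitmask of the people who like it
def bPm (hats : List (List Int)) : List Nat :=
  (List.range hats.length).foldl (fun pm i => bInner hats i pm) (List.replicate 41 0)

-- one hat of the forward DP: push every reachable mask through "nobody/somebody wears this hat"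
def bStep (N : Nat) (avail : Nat) (dist : PySem.Dict Nat Int) : PySem.Dict Nat Int :=
  dist.items.foldl
    (fun new p =>
      (List.range N).foldl
        (fun new i =>
          if (avail >>> i) &&& 1 = 1 ∧ (p.1 >>> i) &&& 1 = 0 then
            new.insert (p.1 + (1 <<< i))
              (PySem.Int.mod (new.getD (p.1 + (1 <<< i)) 0 + p.2) (10 ^ 9 + 7))
          else new)
        (new.insert p.1 (PySem.Int.mod (new.getD p.1 0 + p.2) (10 ^ 9 + 7))))
    PySem.Dict.empty

def numberWays_alt (hats : List (List Int)) : Int :=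
  ((List.range 41).foldl
      (fun dist cur => bStep hats.length ((bPm hats).getD cur 0) dist)
      (PySem.Dict.ofList [(0, 1)])).getD (2 ^ hats.length - 1) 0

-- ===== PRECONDITION & SPEC =====
def Spec_numberWays (hats : List (List Int)) (out : Int) : Prop := out = numberWays_alt hats
instance (hats : List (List Int)) (out : Int) : Decidable (Spec_numberWays hats out) := by unfold Spec_numberWays; infer_instance

-- ===== CLAIM (what is proved, stated in full; the proofs are below) =====
def Claim_equal_numberWays : Prop := ∀ (hats : List (List Int)), Dom_numberWays hats → Spec_numberWays hats (numberWays hats)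

-- ===== LEMMAS AND PROOFS =====

-- (x >>> i) &&& 1 in terms of testBit
theorem pv_shift_and_one (x i : Nat) : (x >>> i) &&& 1 = (if x.testBit i then 1 else 0) := by
  rw [Nat.and_one_is_mod, Nat.shiftRight_eq_div_pow, Nat.testBit_eq_decide_div_mod_eq]
  by_cases h : x / 2 ^ i % 2 = 1 <;> simp [h] <;> omega

theorem pv_and_pow (pos i : Nat) : (pos &&& (1 <<< i) = 0) ↔ pos.testBit i = false := by
  rw [Nat.one_shiftLeft, Nat.and_two_pow]
  cases h : pos.testBit i <;> simp

-- bInner preserves length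
theorem pv_bInner_length (hats : List (List Int)) (i : Nat) (pm : List Nat) :
    (bInner hats i pm).length = pm.length := by
  unfold bInner
  induction hats.getD i [] generalizing pm with
  | nil => rfl
  | cons h t ih =>
    rw [List.foldl_cons, ih]
    split <;> simp [List.length_modify]

-- effect of bInner on entry c (c ≤ 40, pm has length 41)
theorem pv_bInner_getD (hats : List (List Int)) (i : Nat) (pm : List Nat) (c : Nat)
    (hc : c ≤ 40) (hl : pm.length = 41) :
    (bInner hats i pm).getD c 0 = pm.getD c 0 ||| (if (c : Int) ∈ hats.getD i [] then 1 <<< i else 0) := by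
  unfold bInner
  induction hats.getD i [] generalizing pm with
  | nil => simp
  | cons h t ih =>
    rw [List.foldl_cons]
    have hl' : (if 0 ≤ h ∧ h ≤ 40 then pm.modify h.toNat (fun x => x ||| (1 <<< i)) else pm).length = 41 := by
      split <;> simp [List.length_modify, hl]
    rw [ih _ hl']
    have hcl : c < pm.length := by omega
    have hstep : (if 0 ≤ h ∧ h ≤ 40 then pm.modify h.toNat (fun x => x ||| (1 <<< i)) else pm).getD c 0
        = pm.getD c 0 ||| (if (c : Int) = h then 1 <<< i else 0) := by
      split
      · rename_i hg
        have hlen : c < (pm.modify h.toNat (fun x => x ||| (1 <<< i))).length := by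
          simp [List.length_modify]; omega
        rw [List.getD_eq_getElem _ _ hcl, List.getD_eq_getElem _ _ hlen, List.getElem_modify]
        by_cases he : (c : Int) = h
        · have : h.toNat = c := by omega
          simp [this, he]
        · have : h.toNat ≠ c := by omega
          simp [this, he]
      · rename_i hg
        have : ¬ (c : Int) = h := by omega
        simp [this]
    rw [hstep]
    by_cases he : (c : Int) = h
    · by_cases hm : h ∈ t
      · simp [he, hm]
      · simp [he, hm]
    · by_cases hm : (c : Int) ∈ t
      · simp [he, hm]
      · simp [he, hm]

theorem pv_bPm_aux_length (hats : List (List Int)) (n : Nat) :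
    ((List.range n).foldl (fun pm i => bInner hats i pm) (List.replicate 41 0)).length = 41 := by
  induction n with
  | zero => simp
  | succ n ih => rw [List.range_succ, List.foldl_append, List.foldl_cons, List.foldl_nil,
      pv_bInner_length, ih]

theorem pv_bPm_aux_testBit (hats : List (List Int)) (n c j : Nat) (hc : c ≤ 40) :
    (((List.range n).foldl (fun pm i => bInner hats i pm) (List.replicate 41 0)).getD c 0).testBit j
      = (decide (j < n) && decide ((c : Int) ∈ hats.getD j [])) := by
  induction n with
  | zero =>
    have h0 : (List.replicate 41 (0 : Nat)).getD c 0 = 0 := by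
      rw [List.getD_eq_getElem?_getD, List.getElem?_replicate]
      split <;> rfl
    rw [List.range_zero, List.foldl_nil, h0, Nat.zero_testBit]
    simp
  | succ n ih =>
    rw [List.range_succ, List.foldl_append, List.foldl_cons, List.foldl_nil,
      pv_bInner_getD hats n _ c hc (pv_bPm_aux_length hats n), Nat.testBit_lor, ih]
    simp only [List.getD_eq_getElem?_getD]
    by_cases hj : j = n
    · subst hj
      by_cases hm : (c : Int) ∈ hats[j]?.getD []
      · simp only [hm, if_true, Nat.one_shiftLeft, Nat.testBit_two_pow_self]
        simp [hm]
      · simp [hm, Nat.zero_testBit]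
    · have hz : (if (c : Int) ∈ hats[n]?.getD [] then 1 <<< n else 0).testBit j = false := by
        split
        · rw [Nat.one_shiftLeft, Nat.testBit_two_pow_of_ne (by omega)]
        · exact Nat.zero_testBit j
      by_cases hm2 : j < n
      · simp [hz, hm2, show j < n + 1 by omega]
      · simp [hz, hm2, show ¬ j < n + 1 by omega]

theorem pv_bPm_testBit (hats : List (List Int)) (c j : Nat) (hc : c ≤ 40) :
    ((bPm hats).getD c 0).testBit j = (decide (j < hats.length) && decide ((c : Int) ∈ hats.getD j [])) :=
  pv_bPm_aux_testBit hats hats.length c j hc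


-- ===== B-side invariant machinery =====

-- value of A's dp, cast into ZMod (10^9+7)
def pvF (hats : List (List Int)) (c : Nat) : Nat → ZMod (10 ^ 9 + 7) :=
  fun m => ((dpA hats hats.length c m : Int) : ZMod (10 ^ 9 + 7))

-- weighted sum of a dict against F
def pvPhi (F : Nat → ZMod (10 ^ 9 + 7)) (d : PySem.Dict Nat Int) : ZMod (10 ^ 9 + 7) :=
  ∑ x ∈ d.keys.toFinset, ((d.getD x 0 : Int) : ZMod (10 ^ 9 + 7)) * F x

-- the dict after the first n hats of B's forward loop
def pvDist (hats : List (List Int)) (n : Nat) : PySem.Dict Nat Int :=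
  (List.range n).foldl
    (fun dist cur => bStep hats.length ((bPm hats).getD cur 0) dist)
    (PySem.Dict.ofList [(0, 1)])

def pvVals (d : PySem.Dict Nat Int) : Prop := ∀ p ∈ d.items, 0 ≤ p.2 ∧ p.2 < 10 ^ 9 + 7

theorem pv_cast_mod (a : Int) :
    ((PySem.Int.mod a (10 ^ 9 + 7) : Int) : ZMod (10 ^ 9 + 7)) = (a : ZMod (10 ^ 9 + 7)) := by
  rw [PySem.Int.mod_eq_emod_of_pos (by norm_num), Int.emod_def]
  have h : (1000000007 : ZMod (10 ^ 9 + 7)) = 0 := by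
    have h2 : ((10 ^ 9 + 7 : ℕ) : ZMod (10 ^ 9 + 7)) = 0 := ZMod.natCast_self _
    exact_mod_cast h2
  push_cast
  rw [h]
  ring

theorem pv_keys_insert_toFinset (d : PySem.Dict Nat Int) (k : Nat) (v : Int) :
    (d.insert k v).keys.toFinset = insert k d.keys.toFinset := by
  ext x
  simp [PySem.Dict.mem_keys_insert]

theorem pv_phi_split (F : Nat → ZMod (10 ^ 9 + 7)) (d : PySem.Dict Nat Int) (k : Nat) :
    pvPhi F d = ((d.getD k 0 : Int) : ZMod (10 ^ 9 + 7)) * F k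
      + ∑ x ∈ d.keys.toFinset.erase k, ((d.getD x 0 : Int) : ZMod (10 ^ 9 + 7)) * F x := by
  unfold pvPhi
  by_cases h : k ∈ d.keys.toFinset
  · exact (Finset.add_sum_erase _ (fun x => ((d.getD x 0 : Int) : ZMod (10 ^ 9 + 7)) * F x) h).symm
  · rw [Finset.erase_eq_of_notMem h]
    have h0 : d.getD k 0 = 0 := by
      apply PySem.Dict.getD_of_not_contains
      rw [PySem.Dict.contains_eq_decide_mem_keys]
      simp only [decide_eq_false_iff_not]
      intro hk
      exact h (List.mem_toFinset.mpr hk)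
    rw [h0]
    simp

theorem pv_phi_insert (F : Nat → ZMod (10 ^ 9 + 7)) (d : PySem.Dict Nat Int) (k : Nat) (v : Int) :
    pvPhi F (d.insert k (PySem.Int.mod (d.getD k 0 + v) (10 ^ 9 + 7)))
      = pvPhi F d + (v : ZMod (10 ^ 9 + 7)) * F k := by
  rw [pv_phi_split F (d.insert k (PySem.Int.mod (d.getD k 0 + v) (10 ^ 9 + 7))) k,
    pv_phi_split F d k]
  have h1 : (d.insert k (PySem.Int.mod (d.getD k 0 + v) (10 ^ 9 + 7))).getD k 0
      = PySem.Int.mod (d.getD k 0 + v) (10 ^ 9 + 7) := by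
    rw [PySem.Dict.getD_insert]
    simp
  have h2 : ∑ x ∈ (d.insert k (PySem.Int.mod (d.getD k 0 + v) (10 ^ 9 + 7))).keys.toFinset.erase k,
        (((d.insert k (PySem.Int.mod (d.getD k 0 + v) (10 ^ 9 + 7))).getD x 0 : Int) : ZMod (10 ^ 9 + 7)) * F x
      = ∑ x ∈ d.keys.toFinset.erase k, ((d.getD x 0 : Int) : ZMod (10 ^ 9 + 7)) * F x := by
    rw [pv_keys_insert_toFinset, Finset.erase_insert_eq_erase]
    apply Finset.sum_congr rfl
    intro x hx
    have hxk : x ≠ k := Finset.ne_of_mem_erase hx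
    rw [PySem.Dict.getD_insert]
    simp [hxk]
  rw [h1, h2, pv_cast_mod]
  push_cast
  ring

theorem pv_phi_foldl_range (F : Nat → ZMod (10 ^ 9 + 7)) (C : Nat → Prop) [DecidablePred C]
    (g : Nat → Nat) (v : Int) (l : List Nat) (d0 : PySem.Dict Nat Int) :
    pvPhi F (l.foldl
        (fun new i => if C i then new.insert (g i) (PySem.Int.mod (new.getD (g i) 0 + v) (10 ^ 9 + 7)) else new)
        d0)
      = pvPhi F d0 + (l.map (fun i => if C i then (v : ZMod (10 ^ 9 + 7)) * F (g i) else 0)).sum := by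
  induction l generalizing d0 with
  | nil => simp
  | cons hd tl ih =>
    rw [List.foldl_cons, List.map_cons, List.sum_cons, ih]
    by_cases h : C hd
    · rw [if_pos h, if_pos h, pv_phi_insert]
      ring
    · rw [if_neg h, if_neg h]
      ring

theorem pv_phi_empty (F : Nat → ZMod (10 ^ 9 + 7)) : pvPhi F PySem.Dict.empty = 0 := by
  unfold pvPhi
  simp

theorem pv_phi_step (F : Nat → ZMod (10 ^ 9 + 7)) (N avail : Nat) (dist : PySem.Dict Nat Int) :
    pvPhi F (bStep N avail dist)
      = (dist.items.map (fun p =>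
          (p.2 : ZMod (10 ^ 9 + 7)) * F p.1
          + ((List.range N).map (fun i =>
              if (avail >>> i) &&& 1 = 1 ∧ (p.1 >>> i) &&& 1 = 0 then
                (p.2 : ZMod (10 ^ 9 + 7)) * F (p.1 + 1 <<< i) else 0)).sum)).sum := by
  unfold bStep
  generalize dist.items = ps
  have key : ∀ (acc : PySem.Dict Nat Int),
      pvPhi F (ps.foldl
        (fun new p =>
          (List.range N).foldl
            (fun new i =>
              if (avail >>> i) &&& 1 = 1 ∧ (p.1 >>> i) &&& 1 = 0 then
                new.insert (p.1 + (1 <<< i))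
                  (PySem.Int.mod (new.getD (p.1 + (1 <<< i)) 0 + p.2) (10 ^ 9 + 7))
              else new)
            (new.insert p.1 (PySem.Int.mod (new.getD p.1 0 + p.2) (10 ^ 9 + 7))))
        acc)
      = pvPhi F acc + (ps.map (fun p =>
          (p.2 : ZMod (10 ^ 9 + 7)) * F p.1
          + ((List.range N).map (fun i =>
              if (avail >>> i) &&& 1 = 1 ∧ (p.1 >>> i) &&& 1 = 0 then
                (p.2 : ZMod (10 ^ 9 + 7)) * F (p.1 + 1 <<< i) else 0)).sum)).sum := by
    induction ps with
    | nil => intro acc; simp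
    | cons hd tl ih =>
      intro acc
      rw [List.foldl_cons, ih, List.map_cons, List.sum_cons,
        pv_phi_foldl_range F (fun i => (avail >>> i) &&& 1 = 1 ∧ (hd.1 >>> i) &&& 1 = 0)
          (fun i => hd.1 + 1 <<< i) hd.2 (List.range N)
          (acc.insert hd.1 (PySem.Int.mod (acc.getD hd.1 0 + hd.2) (10 ^ 9 + 7))),
        pv_phi_insert]
      ring
  rw [key PySem.Dict.empty, pv_phi_empty, zero_add]

theorem pv_cast_foldl (C : Nat → Prop) [DecidablePred C] (g : Nat → Int) (l : List Nat) (a : Int) :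
    (((l.foldl (fun res i => if C i then res + g i else res) a : Int)) : ZMod (10 ^ 9 + 7))
      = (a : ZMod (10 ^ 9 + 7)) + (l.map (fun i => if C i then (g i : ZMod (10 ^ 9 + 7)) else 0)).sum := by
  induction l generalizing a with
  | nil => simp
  | cons hd tl ih =>
    rw [List.foldl_cons, List.map_cons, List.sum_cons, ih]
    by_cases h : C hd
    · rw [if_pos h, if_pos h]
      push_cast
      ring
    · rw [if_neg h, if_neg h]
      ring

theorem pv_cond_iff (hats : List (List Int)) (c i : Nat) (hc : c ≤ 40) (hiN : i < hats.length) (m : Nat) :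
    (((bPm hats).getD c 0 >>> i) &&& 1 = 1 ∧ (m >>> i) &&& 1 = 0)
      ↔ ((c : Int) ∈ hats.getD i [] ∧ m &&& 1 <<< i = 0) := by
  rw [pv_shift_and_one, pv_shift_and_one, pv_and_pow, pv_bPm_testBit hats c i hc]
  by_cases hm : (c : Int) ∈ hats[i]?.getD [] <;> by_cases hb : m.testBit i = true <;>
    simp [hm, hb, hiN]

-- one entry (m, v) of the forward dict accounts for v * dp(c, m)
theorem pv_entry (hats : List (List Int)) (c : Nat) (hc : c ≤ 40) (m : Nat) (v : Int) :
    (v : ZMod (10 ^ 9 + 7)) * pvF hats (c + 1) m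
      + ((List.range hats.length).map (fun i =>
          if ((bPm hats).getD c 0 >>> i) &&& 1 = 1 ∧ (m >>> i) &&& 1 = 0 then
            (v : ZMod (10 ^ 9 + 7)) * pvF hats (c + 1) (m + 1 <<< i) else 0)).sum
      = (v : ZMod (10 ^ 9 + 7)) * pvF hats c m := by
  by_cases hfull : m = 2 ^ hats.length - 1
  · have hz : ((List.range hats.length).map (fun i =>
        if ((bPm hats).getD c 0 >>> i) &&& 1 = 1 ∧ (m >>> i) &&& 1 = 0 then
          (v : ZMod (10 ^ 9 + 7)) * pvF hats (c + 1) (m + 1 <<< i) else 0))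
        = (List.range hats.length).map (fun _ => 0) := by
      apply List.map_congr_left
      intro i hi
      have hiN : i < hats.length := List.mem_range.mp hi
      have hbit : (m >>> i) &&& 1 = 1 := by
        rw [pv_shift_and_one, hfull, Nat.testBit_two_pow_sub_one]
        simp [hiN]
      simp [hbit]
    rw [hz]
    have h1 : pvF hats (c + 1) m = 1 := by
      unfold pvF
      rw [dpA]
      simp [hfull]
    have h2 : pvF hats c m = 1 := by
      unfold pvF
      rw [dpA]
      simp [hfull]
    simp [h1, h2]
  · have hA : dpA hats hats.length c m
        = PySem.Int.mod
            ((List.range hats.length).foldl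
              (fun res i =>
                if (c : Int) ∈ hats.getD i [] ∧ m &&& (1 <<< i) = 0 then
                  res + dpA hats hats.length (c + 1) (m + (1 <<< i))
                else res)
              (dpA hats hats.length (c + 1) m))
            (10 ^ 9 + 7) := by
      rw [dpA]
      simp [hfull, show ¬ 40 < c by omega]
    unfold pvF
    rw [hA, pv_cast_mod,
      pv_cast_foldl (fun i => (c : Int) ∈ hats.getD i [] ∧ m &&& (1 <<< i) = 0)
        (fun i => dpA hats hats.length (c + 1) (m + (1 <<< i))) (List.range hats.length)
        (dpA hats hats.length (c + 1) m),
      mul_add]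
    congr 1
    rw [← List.sum_map_mul_left]
    apply congrArg
    apply List.map_congr_left
    intro i hi
    have hiN : i < hats.length := List.mem_range.mp hi
    rw [mul_ite, mul_zero]
    exact if_congr (pv_cond_iff hats c i hc hiN m) rfl rfl

theorem pv_foldl_pres {α : Type} (P : PySem.Dict Nat Int → Prop) (l : List α)
    (step : PySem.Dict Nat Int → α → PySem.Dict Nat Int)
    (hstep : ∀ d a, P d → P (step d a)) :
    ∀ d, P d → P (l.foldl step d) := by
  induction l with
  | nil => intro d h; exact h
  | cons hd tl ih => intro d h; exact ih _ (hstep d hd h)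

theorem pv_bStep_nodup (N avail : Nat) (dist : PySem.Dict Nat Int) :
    (bStep N avail dist).keys.Nodup := by
  unfold bStep
  apply pv_foldl_pres (fun d => d.keys.Nodup)
  · intro d p hd
    apply pv_foldl_pres (fun d => d.keys.Nodup)
    · intro d2 i hd2
      split
      · exact PySem.Dict.nodup_keys_insert _ _ _ hd2
      · exact hd2
    · exact PySem.Dict.nodup_keys_insert _ _ _ hd
  · exact PySem.Dict.nodup_keys_empty

theorem pv_vals_insert (d : PySem.Dict Nat Int) (k : Nat) (a : Int) (h : pvVals d) :
    pvVals (d.insert k (PySem.Int.mod a (10 ^ 9 + 7))) := by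
  intro p hp
  rcases (PySem.Dict.mem_items_insert _ _ _ _).mp hp with hp | hp
  · subst hp
    exact ⟨PySem.Int.mod_nonneg _ (by norm_num), PySem.Int.mod_lt _ (by norm_num)⟩
  · exact h p hp.1

theorem pv_bStep_vals (N avail : Nat) (dist : PySem.Dict Nat Int) :
    pvVals (bStep N avail dist) := by
  unfold bStep
  apply pv_foldl_pres pvVals
  · intro d p hd
    apply pv_foldl_pres pvVals
    · intro d2 i hd2
      split
      · exact pv_vals_insert _ _ _ hd2
      · exact hd2
    · exact pv_vals_insert _ _ _ hd
  · intro p hp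
    simp [PySem.Dict.empty] at hp
  
theorem pv_getD_bounds (d : PySem.Dict Nat Int) (h : pvVals d) (k : Nat) :
    0 ≤ d.getD k 0 ∧ d.getD k 0 < 10 ^ 9 + 7 := by
  rw [PySem.Dict.getD_eq_get?_getD]
  cases hg : d.get? k with
  | none => simp
  | some v =>
    have := h (k, v) (PySem.Dict.mem_items_of_get?_eq_some _ hg)
    simpa using this

theorem pv_dpA_bounds (hats : List (List Int)) (N c pos : Nat) :
    0 ≤ dpA hats N c pos ∧ dpA hats N c pos < 10 ^ 9 + 7 := by
  rw [dpA]
  split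
  · norm_num
  · split
    · norm_num
    · exact ⟨PySem.Int.mod_nonneg _ (by norm_num), PySem.Int.mod_lt _ (by norm_num)⟩

theorem pv_chain (hats : List (List Int)) (n : Nat) (hn : n ≤ 41) :
    (pvDist hats n).keys.Nodup ∧ pvVals (pvDist hats n) ∧
      pvPhi (pvF hats n) (pvDist hats n)
        = ((dpA hats hats.length 0 0 : Int) : ZMod (10 ^ 9 + 7)) := by
  induction n with
  | zero =>
    refine ⟨?_, ?_, ?_⟩
    · show (PySem.Dict.ofList [((0 : Nat), (1 : Int))]).keys.Nodup
      decide
    · intro p hp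
      have hp' : p ∈ (PySem.Dict.ofList [((0 : Nat), (1 : Int))]).items := hp
      have hi : (PySem.Dict.ofList [((0 : Nat), (1 : Int))]).items = [(0, 1)] := rfl
      rw [hi] at hp'
      simp at hp'
      rw [hp']
      norm_num
    · show pvPhi (pvF hats 0) (PySem.Dict.ofList [((0 : Nat), (1 : Int))])
        = ((dpA hats hats.length 0 0 : Int) : ZMod (10 ^ 9 + 7))
      unfold pvPhi
      have hk : (PySem.Dict.ofList [((0 : Nat), (1 : Int))]).keys = [0] := rfl
      rw [hk, show ([0] : List Nat).toFinset = {0} from rfl, Finset.sum_singleton,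
        show (PySem.Dict.ofList [((0 : Nat), (1 : Int))]).getD 0 0 = 1 from rfl]
      unfold pvF
      push_cast
      ring
  | succ n ih =>
    obtain ⟨hnd, hvals, hphi⟩ := ih (by omega)
    have hdist : pvDist hats (n + 1) = bStep hats.length ((bPm hats).getD n 0) (pvDist hats n) := by
      unfold pvDist
      rw [List.range_succ, List.foldl_append, List.foldl_cons, List.foldl_nil]
    refine ⟨by rw [hdist]; exact pv_bStep_nodup _ _ _, by rw [hdist]; exact pv_bStep_vals _ _ _, ?_⟩
    rw [hdist, pv_phi_step, PySem.Dict.items_eq_map_keys (pvDist hats n) hnd 0, List.map_map]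
    have hmap : ((pvDist hats n).keys.map
        ((fun p => (p.2 : ZMod (10 ^ 9 + 7)) * pvF hats (n + 1) p.1
          + ((List.range hats.length).map (fun i =>
              if ((bPm hats).getD n 0 >>> i) &&& 1 = 1 ∧ (p.1 >>> i) &&& 1 = 0 then
                (p.2 : ZMod (10 ^ 9 + 7)) * pvF hats (n + 1) (p.1 + 1 <<< i) else 0)).sum)
          ∘ (fun k => (k, (pvDist hats n).getD k 0))))
        = (pvDist hats n).keys.map
            (fun k => (((pvDist hats n).getD k 0 : Int) : ZMod (10 ^ 9 + 7)) * pvF hats n k) := by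
      apply List.map_congr_left
      intro k _
      exact pv_entry hats n (by omega) k ((pvDist hats n).getD k 0)
    rw [hmap, ← List.sum_toFinset _ hnd, ← pvPhi, hphi]
  
-- ===== VERDICT (by name: the statement is the Claim_ definition above) =====
theorem numberWays_spec : Claim_equal_numberWays := by
  intro hats _
  unfold Spec_numberWays numberWays
  obtain ⟨hnd, hvals, hphi⟩ := pv_chain hats 41 le_rfl
  have hext : pvPhi (pvF hats 41) (pvDist hats 41)
      = (((pvDist hats 41).getD (2 ^ hats.length - 1) 0 : Int) : ZMod (10 ^ 9 + 7)) := by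
    rw [pv_phi_split (pvF hats 41) (pvDist hats 41) (2 ^ hats.length - 1)]
    have h1 : pvF hats 41 (2 ^ hats.length - 1) = 1 := by
      unfold pvF
      rw [dpA]
      simp
    have h0 : ∑ x ∈ (pvDist hats 41).keys.toFinset.erase (2 ^ hats.length - 1),
        (((pvDist hats 41).getD x 0 : Int) : ZMod (10 ^ 9 + 7)) * pvF hats 41 x = 0 := by
      apply Finset.sum_eq_zero
      intro x hx
      have hxne := Finset.ne_of_mem_erase hx
      have hz : pvF hats 41 x = 0 := by
        unfold pvF
        rw [dpA]
        simp [hxne]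
      rw [hz, mul_zero]
    rw [h0, h1, mul_one, add_zero]
  rw [hext] at hphi
  have hb1 := pv_dpA_bounds hats hats.length 0 0
  have hb2 := pv_getD_bounds (pvDist hats 41) hvals (2 ^ hats.length - 1)
  have halt : numberWays_alt hats = (pvDist hats 41).getD (2 ^ hats.length - 1) 0 := rfl
  rw [halt]
  have hmod := (ZMod.intCast_eq_intCast_iff _ _ _).mp hphi.symm
  have h1 : dpA hats hats.length 0 0 % ((10 ^ 9 + 7 : ℕ) : ℤ)
      = (pvDist hats 41).getD (2 ^ hats.length - 1) 0 % ((10 ^ 9 + 7 : ℕ) : ℤ) := hmod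
  have hc : ((10 ^ 9 + 7 : ℕ) : ℤ) = (10 ^ 9 + 7 : ℤ) := by norm_num
  rw [hc, Int.emod_eq_of_lt hb1.1 hb1.2, Int.emod_eq_of_lt hb2.1 hb2.2] at h1
  exact h1
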